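-- pv_equiv track=rewrite | github.com/ShayneJG/number-combination-solver | number_combinations.py | format_expression
-- ===== SOURCE A (Python) =====
-- from typing import List, Set, Tuple, Optional, Dict
--
-- def format_expression(numbers: List[int], operators: List[str]) -> str:
--     """Format numbers and operators into a readable expression string."""
--     if not numbers:
--         return ""
--     if len(numbers) == 1:
--         return str(numbers[0])
--
--     segments: List[str] = []
--     current_group: List[str] = [str(numbers[0])]
--     in_mult_group = False
--
--     for i, op in enumerate(operators):
--         if op in ('*', '/'):
--             if not in_mult_group:
--                 in_mult_group = True
--             current_group.append(f" {op} {numbers[i + 1]}")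
--         else:
--             if in_mult_group:
--                 segments.append("(" + "".join(current_group) + ")")
--                 in_mult_group = False
--             else:
--                 segments.append("".join(current_group))
--             segments.append(f" {op} ")
--             current_group = [str(numbers[i + 1])]
--
--     if in_mult_group:
--         segments.append("(" + "".join(current_group) + ")")
--     else:
--         segments.append("".join(current_group))
--
--     return "".join(segments)
-- ===== SOURCE B (Python) =====
-- def fmt_group(nums, ops):
--     body = nums[0] + "".join(f" {o} {n}" for o, n in zip(ops, nums[1:]))
--     return f"({body})" if len(nums) > 1 else body
--
--
-- def format_expression(numbers, operators):
--     """Format numbers and operators into a readable expression string."""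
--     if not numbers:
--         return ""
--     if len(numbers) == 1:
--         return str(numbers[0])
--
--     # Phase 1: split into multiplicative groups separated by additive operators.
--     groups = []
--     seps = []
--     cur_nums = [str(numbers[0])]
--     cur_ops = []
--     for i, op in enumerate(operators):
--         if op in ('*', '/'):
--             cur_ops.append(op)
--             cur_nums.append(str(numbers[i + 1]))
--         else:
--             groups.append((cur_nums, cur_ops))
--             seps.append(op)
--             cur_nums = [str(numbers[i + 1])]
--             cur_ops = []
--     groups.append((cur_nums, cur_ops))
--
--     # Phase 2: format each group (parenthesize iff it has several numbers)
--     # and interleave with the additive separators.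
--     out = fmt_group(*groups[0])
--     for sep, g in zip(seps, groups[1:]):
--         out += f" {sep} " + fmt_group(*g)
--     return out
-- ===== Notes on version B (the rewrite author's own statement) =====
-- stated objective: simpler
-- what changed: Replaced A's single-pass segment builder with its in_mult_group flag by a two-phase decomposition: first collect multiplicative groups and additive separators, then format each group (parenthesized iff it has several numbers) and interleave with the separators.
import Mathlib
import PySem

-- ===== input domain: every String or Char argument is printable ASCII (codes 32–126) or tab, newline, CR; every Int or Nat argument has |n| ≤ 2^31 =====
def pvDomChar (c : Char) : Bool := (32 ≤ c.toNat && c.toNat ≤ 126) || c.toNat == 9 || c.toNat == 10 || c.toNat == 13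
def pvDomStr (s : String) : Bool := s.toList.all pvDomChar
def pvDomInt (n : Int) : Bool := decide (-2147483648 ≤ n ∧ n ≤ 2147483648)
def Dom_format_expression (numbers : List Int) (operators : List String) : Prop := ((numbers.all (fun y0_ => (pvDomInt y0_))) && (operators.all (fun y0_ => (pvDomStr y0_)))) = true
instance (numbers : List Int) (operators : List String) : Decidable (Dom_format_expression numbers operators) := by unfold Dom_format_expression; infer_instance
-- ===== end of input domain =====

-- B is a two-phase decomposition (collect multiplicative groups + additive separators, then
-- format) of A's single-pass segment builder; objective: simpler. Return value only, no mutation.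

-- ===== PORT A =====
-- one loop step of A's for-loop; numbers[i+1] is PySem.List.pyGet? (the `.getD 0` default is
-- never reached inside Pre_, where the index is in range)
def stepA (numbers : List Int) (st : List String × List String × Bool) (p : Int × String) :
    List String × List String × Bool :=
  let segs := st.1; let cur := st.2.1; let inMult := st.2.2
  let i := p.1; let op := p.2
  if op == "*" || op == "/" then
    (segs, cur ++ [" " ++ op ++ " " ++ PySem.Int.toStr ((PySem.List.pyGet? numbers (i + 1)).getD 0)], true)
  else
    ((if inMult then segs ++ ["(" ++ String.join cur ++ ")"] else segs ++ [String.join cur]) ++ [" " ++ op ++ " "],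
     [PySem.Int.toStr ((PySem.List.pyGet? numbers (i + 1)).getD 0)], false)

def format_expression (numbers : List Int) (operators : List String) : String :=
  match numbers with
  | [] => ""
  | n0 :: rest =>
    if rest.isEmpty then PySem.Int.toStr n0
    else
      let st := (PySem.List.enumerate operators).foldl (stepA numbers) ([], [PySem.Int.toStr n0], false)
      String.join (st.1 ++ [if st.2.2 then "(" ++ String.join st.2.1 ++ ")" else String.join st.2.1])

-- ===== PORT B =====
-- Source B's fmt_group; nums is never empty where it is called, so nums[0] is ported as headD ""
def fmtGroup (nums ops : List String) : String :=
  let body := nums.headD "" ++ String.join ((ops.zip (nums.drop 1)).map fun p => " " ++ p.1 ++ " " ++ p.2)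
  if nums.length > 1 then "(" ++ body ++ ")" else body

-- one step of B's phase-1 loop; state = (groups, seps, cur_nums, cur_ops)
def stepB (numbers : List Int)
    (st : List (List String × List String) × List String × List String × List String)
    (p : Int × String) :
    List (List String × List String) × List String × List String × List String :=
  let groups := st.1; let seps := st.2.1; let curN := st.2.2.1; let curO := st.2.2.2
  let i := p.1; let op := p.2
  if op == "*" || op == "/" then
    (groups, seps, curN ++ [PySem.Int.toStr ((PySem.List.pyGet? numbers (i + 1)).getD 0)], curO ++ [op])
  else
    (groups ++ [(curN, curO)], seps ++ [op],
     [PySem.Int.toStr ((PySem.List.pyGet? numbers (i + 1)).getD 0)], [])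

def format_expression_alt (numbers : List Int) (operators : List String) : String :=
  match numbers with
  | [] => ""
  | n0 :: rest =>
    if rest.isEmpty then PySem.Int.toStr n0
    else
      let st := (PySem.List.enumerate operators).foldl (stepB numbers) ([], [], [PySem.Int.toStr n0], [])
      let groups := st.1 ++ [(st.2.2.1, st.2.2.2)]
      let seps := st.2.1
      fmtGroup (groups.headD ([], [])).1 (groups.headD ([], [])).2 ++
        String.join ((seps.zip (groups.drop 1)).map fun p => " " ++ p.1 ++ " " ++ fmtGroup p.2.1 p.2.2)

-- ===== PRECONDITION & SPEC =====
-- Pre_ excludes exactly the inputs where A raises IndexError (an operator with no right operand: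
-- operators reaching to or past the end of numbers, while len(numbers) ≥ 2); B raises there too.
def Pre_format_expression (numbers : List Int) (operators : List String) : Prop :=
  numbers.length ≤ 1 ∨ operators.length < numbers.length
instance (numbers : List Int) (operators : List String) : Decidable (Pre_format_expression numbers operators) := by unfold Pre_format_expression; infer_instance

def pvWitness_format_expression : List Int × List String := ([1, 2, 3, 4], ["*", "+", "/"])

def Spec_format_expression (numbers : List Int) (operators : List String) (out : String) : Prop := out = format_expression_alt numbers operators
instance (numbers : List Int) (operators : List String) (out : String) : Decidable (Spec_format_expression numbers operators out) := by unfold Spec_format_expression; infer_instance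

-- ===== CLAIM (what is proved, stated in full; the proofs are below) =====
def Claim_equal_format_expression : Prop := ∀ (numbers : List Int) (operators : List String), Dom_format_expression numbers operators → Pre_format_expression numbers operators → Spec_format_expression numbers operators (format_expression numbers operators)

-- ===== LEMMAS AND PROOFS =====

-- String.join basics (not in Mathlib; exact? finds nothing for these)
theorem foldl_append_eq_join (l : List String) : ∀ init : String, l.foldl (· ++ ·) init = init ++ String.join l := by
  induction l with
  | nil => intro init; simp [String.join]
  | cons y ys ih =>
    intro init
    simp only [String.join, List.foldl_cons] at *
    rw [ih, ih ("" ++ y)]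
    simp [String.append_assoc]

theorem join_cons (x : String) (l : List String) : String.join (x :: l) = x ++ String.join l := by
  show List.foldl (· ++ ·) "" (x :: l) = _
  simp only [List.foldl_cons]
  rw [foldl_append_eq_join]
  simp

theorem join_singleton (s : String) : String.join [s] = s := by
  rw [join_cons]; simp [String.join]

theorem join_append (a b : List String) : String.join (a ++ b) = String.join a ++ String.join b := by
  show List.foldl (· ++ ·) "" (a ++ b) = _
  rw [List.foldl_append, foldl_append_eq_join]
  rfl

-- body of fmtGroup, as a standalone function for the loop invariant
def gbody (nums ops : List String) : String :=
  nums.headD "" ++ String.join ((ops.zip (nums.drop 1)).map fun p => " " ++ p.1 ++ " " ++ p.2)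

-- A's segments list = B's finished groups interleaved with their separators
def interleave (groups : List (List String × List String)) (seps : List String) : List String :=
  (groups.zip seps).flatMap fun p => [fmtGroup p.1.1 p.1.2, " " ++ p.2 ++ " "]

theorem gbody_append (ns os : List String) (n o : String) (h : ns.length = os.length + 1) :
    gbody (ns ++ [n]) (os ++ [o]) = gbody ns os ++ (" " ++ o ++ " " ++ n) := by
  match ns with
  | [] => simp at h
  | x :: t =>
    simp only [gbody, List.cons_append, List.headD_cons, List.drop_one, List.tail_cons]
    rw [List.zip_append (by simp at h; omega)]
    simp [join_append, join_singleton, String.append_assoc]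

theorem gbody_singleton (n : String) : gbody [n] [] = n := by
  simp [gbody, String.join]

theorem fmtGroup_eq (nums ops : List String) :
    fmtGroup nums ops = if nums.length > 1 then "(" ++ gbody nums ops ++ ")" else gbody nums ops := rfl

theorem interleave_append (groups : List (List String × List String)) (seps : List String)
    (g : List String × List String) (s : String) (h : groups.length = seps.length) :
    interleave (groups ++ [g]) (seps ++ [s]) =
      interleave groups seps ++ [fmtGroup g.1 g.2, " " ++ s ++ " "] := by
  simp only [interleave]
  rw [List.zip_append h]
  simp

-- the loop invariant: running A's loop and B's loop over the same (index, op) list from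
-- corresponding states yields corresponding states
theorem loop_inv (numbers : List Int) (l : List (Int × String)) :
    ∀ (segs cur : List String) (inMult : Bool)
      (groups : List (List String × List String)) (seps curN curO : List String),
      String.join cur = gbody curN curO →
      inMult = decide (1 < curN.length) →
      curN.length = curO.length + 1 →
      segs = interleave groups seps →
      groups.length = seps.length →
      (let a := l.foldl (stepA numbers) (segs, cur, inMult)
       let b := l.foldl (stepB numbers) (groups, seps, curN, curO)
       a.1 = interleave b.1 b.2.1 ∧ String.join a.2.1 = gbody b.2.2.1 b.2.2.2 ∧
       a.2.2 = decide (1 < b.2.2.1.length) ∧ b.2.2.1.length = b.2.2.2.length + 1 ∧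
       b.1.length = b.2.1.length) := by
  induction l with
  | nil => intro segs cur inMult groups seps curN curO h1 h2 h3 h4 h5; exact ⟨h4, h1, h2, h3, h5⟩
  | cons p t ih =>
    intro segs cur inMult groups seps curN curO h1 h2 h3 h4 h5
    simp only [List.foldl_cons]
    by_cases hop : (p.2 == "*" || p.2 == "/") = true
    · simp only [stepA, stepB, hop, if_pos]
      exact ih _ _ _ _ _ _ _
        (by rw [join_append, h1, gbody_append _ _ _ _ h3, join_singleton])
        (by simp; omega) (by simp [h3]) h4 h5
    · have hop' : (p.2 == "*" || p.2 == "/") = false := by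
        revert hop; cases (p.2 == "*" || p.2 == "/") <;> simp
      simp only [stepA, stepB, hop', Bool.false_eq_true, if_false]
      refine ih _ _ _ _ _ _ _ (by rw [gbody_singleton, join_singleton]) (by simp) (by simp)
        ?_ (by simp [h5])
      rw [h4, interleave_append _ _ _ _ h5, fmtGroup_eq]
      rw [← h1, h2]
      by_cases hm : 1 < curN.length <;> simp [hm]

-- final render: B's phase-2 output over (groups ++ [last]) equals A's joined segments
theorem render_eq (groups : List (List String × List String)) (seps : List String)
    (c : List String × List String) (h : groups.length = seps.length) :
    String.join (interleave groups seps ++ [fmtGroup c.1 c.2]) =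
      fmtGroup ((groups ++ [c]).headD ([], [])).1 ((groups ++ [c]).headD ([], [])).2 ++
        String.join ((seps.zip ((groups ++ [c]).drop 1)).map fun p => " " ++ p.1 ++ " " ++ fmtGroup p.2.1 p.2.2) := by
  induction groups generalizing seps with
  | nil =>
    match seps with
    | [] => simp [interleave, String.join]
    | _ :: _ => simp at h
  | cons g gs ihg =>
    match seps with
    | [] => simp at h
    | s :: st =>
      have ih := ihg st (by simpa using h)
      simp only [interleave, List.zip_cons_cons, List.flatMap_cons, List.cons_append,
        List.headD_cons, List.drop_succ_cons, List.drop_zero, List.nil_append] at *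
      rw [join_cons, join_cons, ih]
      match gs with
      | [] => simp [String.join, String.append_assoc]
      | g2 :: gs' => simp [join_cons, String.append_assoc]

-- ===== VERDICT (by name: the statement is the Claim_ definition above) =====
theorem format_expression_spec : Claim_equal_format_expression := by
  intro numbers operators _ _
  unfold Spec_format_expression format_expression format_expression_alt
  match numbers with
  | [] => rfl
  | n0 :: rest =>
    by_cases hr : rest.isEmpty = true
    · simp [hr]
    · simp only [hr, Bool.false_eq_true, if_false]
      obtain ⟨e1, e2, e3, e4, e5⟩ :=
        loop_inv (n0 :: rest) (PySem.List.enumerate operators)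
          [] [PySem.Int.toStr n0] false [] [] [PySem.Int.toStr n0] []
          (by rw [gbody_singleton, join_singleton]) (by simp) (by simp) (by simp [interleave]) rfl
      have hclose :
          (if (List.foldl (stepA (n0 :: rest)) ([], [PySem.Int.toStr n0], false)
                (PySem.List.enumerate operators)).2.2 = true then
            "(" ++ String.join (List.foldl (stepA (n0 :: rest)) ([], [PySem.Int.toStr n0], false)
                (PySem.List.enumerate operators)).2.1 ++ ")"
          else String.join (List.foldl (stepA (n0 :: rest)) ([], [PySem.Int.toStr n0], false)
                (PySem.List.enumerate operators)).2.1) =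
          fmtGroup (List.foldl (stepB (n0 :: rest)) ([], [], [PySem.Int.toStr n0], [])
                (PySem.List.enumerate operators)).2.2.1
            (List.foldl (stepB (n0 :: rest)) ([], [], [PySem.Int.toStr n0], [])
                (PySem.List.enumerate operators)).2.2.2 := by
        rw [e3, e2, fmtGroup_eq]
        by_cases hm : 1 < (List.foldl (stepB (n0 :: rest)) ([], [], [PySem.Int.toStr n0], [])
            (PySem.List.enumerate operators)).2.2.1.length <;> simp [hm]
      rw [e1, hclose, render_eq _ _ _ e5]
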